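-- pv_equiv track=rewrite | github.com/rmdelaney13/pyr1_pipeline | scripts/laser_fasta_to_csv.py | signature_to_sequence
-- ===== SOURCE A (Python) =====
-- WT_PYR1_SEQUENCE = (
--     "MASELTPEERSELKNSIAEFHTYQLDPGSCSSLHAQRIHAPPELVWSIVRRFDKPQTYKHFIKSCSV"
--     "EQNFEMRVGCTRDVIVISGLPANTSTERLDILDDERRVTGFSIIGGEHRLTNYKSVTTVHRFEKENRI"
--     "WTVVLESYVVDMPEGNSEDDTRMFADTVVKLNLQKLATVAEAMARN"
-- )
--
-- def signature_to_sequence(signature: str, wt_seq: str = WT_PYR1_SEQUENCE) -> str: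
--     """Reconstruct full sequence from variant signature like '59V;81D;83L'.
--
--     Inverse of sequence_to_signature(). Applies mutations to WT sequence.
--     """
--     seq = list(wt_seq)
--     if not signature:
--         return wt_seq
--     for mut in signature.split(';'):
--         mut = mut.strip()
--         if not mut:
--             continue
--         pos = int(mut[:-1]) - 1  # 1-indexed to 0-indexed
--         aa = mut[-1]
--         if 0 <= pos < len(seq):
--             seq[pos] = aa
--     return ''.join(seq)
-- ===== SOURCE B (Python) =====
-- WT_PYR1_SEQUENCE = (
--     "MASELTPEERSELKNSIAEFHTYQLDPGSCSSLHAQRIHAPPELVWSIVRRFDKPQTYKHFIKSCSV"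
--     "EQNFEMRVGCTRDVIVISGLPANTSTERLDILDDERRVTGFSIIGGEHRLTNYKSVTTVHRFEKENRI"
--     "WTVVLESYVVDMPEGNSEDDTRMFADTVVKLNLQKLATVAEAMARN"
-- )
--
-- def signature_to_sequence(signature: str, wt_seq: str = WT_PYR1_SEQUENCE) -> str:
--     """Reconstruct full sequence from variant signature like '59V;81D;83L'.
--
--     Sort-and-splice: collect the effective (position, aa) edits, sort them,
--     and assemble the result from untouched slices of wt_seq between edits.
--     """
--     if not signature:
--         return wt_seq
--     pairs = []
--     for tok in signature.split(';'):
--         tok = tok.strip()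
--         if tok:
--             pairs.append((int(tok[:-1]) - 1, tok[-1]))
--     # effective edit per position = last mention; drop out-of-range positions
--     seen = set()
--     edits = []
--     for pos, aa in reversed(pairs):
--         if 0 <= pos < len(wt_seq) and pos not in seen:
--             seen.add(pos)
--             edits.append((pos, aa))
--     edits.sort(key=lambda e: e[0])
--     parts = []
--     cursor = 0
--     for pos, aa in edits:
--         parts.append(wt_seq[cursor:pos])
--         parts.append(aa)
--         cursor = pos + 1
--     parts.append(wt_seq[cursor:])
--     return ''.join(parts)
-- ===== Notes on version B (the rewrite author's own statement) =====
-- stated objective: alternative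
-- what changed: B replaces A's per-token in-place updates of a list copy by a sort-and-splice algorithm: it computes the set of effective edits (last mention per position, in-range only), sorts them by position, and assembles the result by concatenating the untouched slices of wt_seq between consecutive edit positions.
-- outside the precondition, e.g. on signature_to_sequence('5X;abcV', 'AAAAAA'): A raises ValueError, B raises ValueError
import Mathlib
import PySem

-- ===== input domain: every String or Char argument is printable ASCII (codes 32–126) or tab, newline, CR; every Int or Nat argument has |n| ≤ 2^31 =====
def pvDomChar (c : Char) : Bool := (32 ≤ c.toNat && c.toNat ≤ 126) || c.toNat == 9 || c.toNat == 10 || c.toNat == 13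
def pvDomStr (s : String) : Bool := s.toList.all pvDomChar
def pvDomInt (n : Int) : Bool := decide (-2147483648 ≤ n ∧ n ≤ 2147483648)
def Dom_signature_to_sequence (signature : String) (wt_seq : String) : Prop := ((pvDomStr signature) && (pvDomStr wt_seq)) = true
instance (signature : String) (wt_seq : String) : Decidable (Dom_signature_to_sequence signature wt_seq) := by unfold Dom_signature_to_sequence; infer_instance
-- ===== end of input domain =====

-- B replaces A's per-token in-place list updates by sort-and-splice: effective edits (last mention
-- per position, in range) sorted by position, output assembled from untouched slices between them.

-- ===== PORT A =====
-- loop body of A: one mutation token applied to the current sequence list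
def pvStepA (seq : List Char) (mut0 : List Char) : List Char :=
  let m := PySem.Chars.strip mut0
  if m = [] then seq
  else
    match PySem.Int.ofChars? (PySem.List.slice m none (some (-1))) with
    | none => seq  -- Python raises ValueError here; such inputs are outside Pre_
    | some n =>
      let pos := n - 1
      let aa := PySem.List.pyGetD m (-1) ' '
      if 0 ≤ pos ∧ pos < (seq.length : Int) then PySem.List.pySetD seq pos aa else seq

def signature_to_sequence (signature : String) (wt_seq : String) : String :=
  let seq := wt_seq.toList
  if signature.toList = [] then wt_seq
  else String.ofList ((PySem.Chars.splitOn signature.toList [';']).foldl pvStepA seq)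

-- ===== PORT B =====
-- pairs.append((int(tok[:-1]) - 1, tok[-1])) for each nonempty stripped token
def pvParseTok (acc : List (Int × Char)) (tok0 : List Char) : List (Int × Char) :=
  let tok := PySem.Chars.strip tok0
  if tok = [] then acc
  else
    match PySem.Int.ofChars? (PySem.List.slice tok none (some (-1))) with
    | none => acc  -- Python raises ValueError here; such inputs are outside Pre_
    | some n => acc ++ [(n - 1, PySem.List.pyGetD tok (-1) ' ')]

-- loop over reversed(pairs): keep an edit only if in range and its position unseen
def pvDedupStep (wtlen : Int) (st : PySem.Set Int × List (Int × Char)) (p : Int × Char) :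
    PySem.Set Int × List (Int × Char) :=
  if 0 ≤ p.1 ∧ p.1 < wtlen ∧ p.1 ∉ st.1 then (PySem.Set.add st.1 p.1, st.2 ++ [p]) else st

-- splice loop: parts.append(wt_seq[cursor:pos]); parts.append(aa); cursor = pos + 1
def pvSpliceStep (xs : List Char) (st : List Char × Int) (p : Int × Char) : List Char × Int :=
  (st.1 ++ PySem.List.slice xs (some st.2) (some p.1) ++ [p.2], p.1 + 1)

def signature_to_sequence_alt (signature : String) (wt_seq : String) : String :=
  if signature.toList = [] then wt_seq
  else
    let xs := wt_seq.toList
    let pairs := (PySem.Chars.splitOn signature.toList [';']).foldl pvParseTok []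
    let edits := (pairs.reverse.foldl (pvDedupStep (xs.length : Int)) (PySem.Set.empty, [])).2
    let sortedE := PySem.List.sorted edits (fun e => e.1) false
    let st := sortedE.foldl (pvSpliceStep xs) ([], 0)
    String.ofList (st.1 ++ PySem.List.slice xs (some st.2) none)

-- ===== PRECONDITION & SPEC =====
-- Pre_ excludes exactly the inputs where Python A raises ValueError: a nonempty
-- stripped token whose prefix (all but the last char) is not parseable by int().
def Pre_signature_to_sequence (signature : String) (wt_seq : String) : Prop :=
  ∀ t ∈ PySem.Chars.splitOn signature.toList [';'],
    PySem.Chars.strip t = [] ∨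
      (PySem.Int.ofChars? (PySem.List.slice (PySem.Chars.strip t) none (some (-1)))).isSome
instance (signature : String) (wt_seq : String) : Decidable (Pre_signature_to_sequence signature wt_seq) := by
  unfold Pre_signature_to_sequence; infer_instance

def pvWitness_signature_to_sequence : String × String := ("2D; 5 X ;;1A;2Q", "ABCDE")

def Spec_signature_to_sequence (signature : String) (wt_seq : String) (out : String) : Prop := out = signature_to_sequence_alt signature wt_seq
instance (signature : String) (wt_seq : String) (out : String) : Decidable (Spec_signature_to_sequence signature wt_seq out) := by unfold Spec_signature_to_sequence; infer_instance

-- ===== CLAIM (what is proved, stated in full; the proofs are below) =====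
def Claim_equal_signature_to_sequence : Prop := ∀ (signature : String) (wt_seq : String), Dom_signature_to_sequence signature wt_seq → Pre_signature_to_sequence signature wt_seq → Spec_signature_to_sequence signature wt_seq (signature_to_sequence signature wt_seq)

-- ===== LEMMAS AND PROOFS =====

-- proof-side model: the dict of last assignments, and the pointwise overlay
def pvRecord (d : PySem.Dict Int Char) (tok0 : List Char) : PySem.Dict Int Char :=
  let tok := PySem.Chars.strip tok0
  if tok = [] then d
  else
    match PySem.Int.ofChars? (PySem.List.slice tok none (some (-1))) with
    | none => d
    | some n => d.insert (n - 1) (PySem.List.pyGetD tok (-1) ' ')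

def pvApply (d : PySem.Dict Int Char) (xs : List Char) : List Char :=
  (PySem.List.enumerate xs).map (fun p => (d.get? p.1).getD p.2)

-- ---------- A-side: A's fold is the pointwise overlay of the last-assignment dict ----------

theorem length_pvApply (d : PySem.Dict Int Char) (xs : List Char) :
    (pvApply d xs).length = xs.length := by
  simp [pvApply, PySem.List.length_enumerate]

theorem getElem?_pvApply (d : PySem.Dict Int Char) (xs : List Char) (k : Nat) :
    (pvApply d xs)[k]? = xs[k]?.map (fun c => (d.get? (k : Int)).getD c) := by
  simp [pvApply, PySem.List.getElem?_enumerate]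
  cases xs[k]? <;> simp

theorem pvApply_empty (xs : List Char) : pvApply PySem.Dict.empty xs = xs := by
  unfold pvApply
  rw [show (fun p : Int × Char => ((PySem.Dict.empty.get? p.1).getD p.2)) = (fun p => p.2) by
    funext p; simp [PySem.Dict.get?_empty]]
  exact PySem.List.map_snd_enumerate xs 0

theorem pvStep_comm (d : PySem.Dict Int Char) (xs : List Char) (t : List Char) :
    pvStepA (pvApply d xs) t = pvApply (pvRecord d t) xs := by
  unfold pvStepA pvRecord
  by_cases h0 : PySem.Chars.strip t = []
  · simp [h0]
  · simp only [h0]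
    cases hp : PySem.Int.ofChars? (PySem.List.slice (PySem.Chars.strip t) none (some (-1))) with
    | none => simp
    | some n =>
      simp only []
      set aa := PySem.List.pyGetD (PySem.Chars.strip t) (-1) ' ' with haa
      by_cases hin : 0 ≤ n - 1 ∧ n - 1 < ((pvApply d xs).length : Int)
      · rw [if_pos hin]
        rw [length_pvApply] at hin
        rw [PySem.List.pySetD_of_nonneg _ _ hin.1]
        apply List.ext_getElem?
        intro k
        simp only [reduceIte]
        rw [getElem?_pvApply]
        by_cases hk : (n - 1).toNat = k
        · subst hk
          have hklt : (n - 1).toNat < xs.length := by omega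
          have hcast : (((n - 1).toNat : Nat) : Int) = n - 1 := Int.toNat_of_nonneg hin.1
          rw [List.getElem?_set_self (by rwa [length_pvApply]), hcast,
              List.getElem?_eq_getElem hklt, Option.map_some, PySem.Dict.get?_insert_self]
          rfl
        · rw [List.getElem?_set_ne hk, getElem?_pvApply]
          by_cases hlt : k < xs.length
          · have hne : (k : Int) ≠ n - 1 := by omega
            rw [PySem.Dict.get?_insert_of_ne _ _ hne]
          · simp [List.getElem?_eq_none (le_of_not_gt hlt)]
      · rw [if_neg hin]
        rw [length_pvApply] at hin
        apply List.ext_getElem?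
        intro k
        simp only [reduceIte]
        rw [getElem?_pvApply, getElem?_pvApply]
        by_cases hlt : k < xs.length
        · have hne : (k : Int) ≠ n - 1 := by omega
          rw [PySem.Dict.get?_insert_of_ne _ _ hne]
        · simp [List.getElem?_eq_none (le_of_not_gt hlt)]

theorem pvFold_comm (toks : List (List Char)) (xs : List Char) :
    ∀ d, toks.foldl pvStepA (pvApply d xs) = pvApply (toks.foldl pvRecord d) xs := by
  induction toks with
  | nil => intro d; rfl
  | cons t ts ih =>
    intro d
    simp only [List.foldl_cons, pvStep_comm d xs t]
    exact ih (pvRecord d t)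

-- ---------- link: the parsed pair list generates the same dict ----------

theorem parse_acc (toks : List (List Char)) :
    ∀ acc, toks.foldl pvParseTok acc = acc ++ toks.foldl pvParseTok [] := by
  induction toks with
  | nil => simp
  | cons t ts ih =>
    intro acc
    simp only [List.foldl_cons]
    rw [ih (pvParseTok acc t), ih (pvParseTok [] t)]
    unfold pvParseTok
    by_cases h0 : PySem.Chars.strip t = []
    · simp [h0]
    · simp only [h0, if_false]
      cases hp : PySem.Int.ofChars? (PySem.List.slice (PySem.Chars.strip t) none (some (-1))) <;>
        simp

theorem record_eq_dict_fold (toks : List (List Char)) :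
    ∀ d, toks.foldl pvRecord d
      = (toks.foldl pvParseTok []).foldl (fun d p => d.insert p.1 p.2) d := by
  induction toks with
  | nil => intro d; rfl
  | cons t ts ih =>
    intro d
    simp only [List.foldl_cons]
    rw [ih (pvRecord d t), parse_acc ts (pvParseTok [] t), List.foldl_append]
    congr 1
    unfold pvRecord pvParseTok
    by_cases h0 : PySem.Chars.strip t = []
    · simp [h0]
    · simp only [h0, if_false]
      cases hp : PySem.Int.ofChars? (PySem.List.slice (PySem.Chars.strip t) none (some (-1))) <;>
        simp

-- lookup in the insert-fold dict = first match in the reversed pair list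
theorem get?_dict_fold (ps : List (Int × Char)) :
    ∀ (d : PySem.Dict Int Char) (k : Int),
      (ps.foldl (fun d p => d.insert p.1 p.2) d).get? k
        = match ps.reverse.find? (fun q => q.1 == k) with
          | some q => some q.2
          | none => d.get? k := by
  induction ps using List.reverseRecOn with
  | nil => intro d k; simp
  | append_singleton qs p ih =>
    intro d k
    rw [List.foldl_append]
    simp only [List.foldl_cons, List.foldl_nil, List.reverse_append, List.reverse_singleton,
      List.singleton_append, List.find?_cons]
    by_cases hk : p.1 = k
    · subst hk; simp [PySem.Dict.get?_insert_self]
    · have : (p.1 == k) = false := by simp [hk]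
      rw [this]
      simp only [Bool.false_eq_true, if_false]
      rw [PySem.Dict.get?_insert_of_ne _ _ (by simpa using Ne.symm hk)]
      exact ih d k

-- ---------- dedup loop: membership characterisation and distinct positions ----------

theorem dedup_spec (n : Int) (L : List (Int × Char)) :
    ∀ (s : PySem.Set Int) (E : List (Int × Char)),
      (∀ k : Int, k ∈ s ↔ k ∈ E.map Prod.fst) → (E.map Prod.fst).Nodup →
      (∀ q : Int × Char,
          q ∈ (L.foldl (pvDedupStep n) (s, E)).2 ↔
            q ∈ E ∨ ((0 ≤ q.1 ∧ q.1 < n) ∧ q.1 ∉ s ∧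
              L.find? (fun r => r.1 == q.1) = some q))
      ∧ ((L.foldl (pvDedupStep n) (s, E)).2.map Prod.fst).Nodup := by
  induction L with
  | nil => intro s E hinv hnd; simp [hnd]
  | cons p L ih =>
    intro s E hinv hnd
    simp only [List.foldl_cons]
    by_cases hc : 0 ≤ p.1 ∧ p.1 < n ∧ p.1 ∉ s
    · rw [show pvDedupStep n (s, E) p = (PySem.Set.add s p.1, E ++ [p]) by
        simp [pvDedupStep, hc]]
      have hp1 : p.1 ∉ E.map Prod.fst := fun h => hc.2.2 ((hinv p.1).2 h)
      have hinv' : ∀ k : Int, k ∈ PySem.Set.add s p.1 ↔ k ∈ (E ++ [p]).map Prod.fst := by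
        intro k
        rw [PySem.Set.mem_add]
        simp [hinv k]
      have hnd' : ((E ++ [p]).map Prod.fst).Nodup := by
        simp only [List.map_append, List.map_cons, List.map_nil]
        exact by
          simp only [List.nodup_append, List.nodup_singleton]
          refine ⟨hnd, trivial, ?_⟩
          intro a ha b hb
          simp only [List.mem_singleton] at hb
          subst hb
          exact fun h => hp1 (h ▸ ha)
      obtain ⟨hm, hn2⟩ := ih (PySem.Set.add s p.1) (E ++ [p]) hinv' hnd'
      refine ⟨fun q => ?_, hn2⟩
      rw [hm q, List.find?_cons]
      by_cases hq : p.1 = q.1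
      · have : (p.1 == q.1) = true := by simp [hq]
        rw [this]
        constructor
        · rintro (hE | hnot)
          · rcases (List.mem_append.mp hE) with h | h
            · exact Or.inl h
            · simp only [List.mem_singleton] at h
              subst h
              exact Or.inr ⟨⟨hc.1, hc.2.1⟩, hc.2.2, rfl⟩
          · exact absurd ((PySem.Set.mem_add _ _ _).mpr (Or.inr hq.symm)) hnot.2.1
        · rintro (hE | ⟨_, _, hfind⟩)
          · exact Or.inl (List.mem_append.mpr (Or.inl hE))
          · have : p = q := by injection hfind
            exact Or.inl (List.mem_append.mpr (Or.inr (by simp [this])))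
      · have : (p.1 == q.1) = false := by simp [hq]
        rw [this]
        simp only [Bool.false_eq_true, if_false]
        constructor
        · rintro (hE | ⟨hr, hns, hf⟩)
          · rcases List.mem_append.mp hE with h | h
            · exact Or.inl h
            · simp only [List.mem_singleton] at h
              exact absurd (congrArg Prod.fst h).symm hq
          · refine Or.inr ⟨hr, fun hs => hns ((PySem.Set.mem_add _ _ _).mpr (Or.inl hs)), hf⟩
        · rintro (hE | ⟨hr, hns, hf⟩)
          · exact Or.inl (List.mem_append.mpr (Or.inl hE))
          · refine Or.inr ⟨hr, fun hs => ?_, hf⟩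
            rcases (PySem.Set.mem_add _ _ _).mp hs with h | h
            · exact hns h
            · exact hq h.symm
    · rw [show pvDedupStep n (s, E) p = (s, E) by simp [pvDedupStep, hc]]
      obtain ⟨hm, hn2⟩ := ih s E hinv hnd
      refine ⟨fun q => ?_, hn2⟩
      rw [hm q, List.find?_cons]
      by_cases hq : p.1 = q.1
      · have : (p.1 == q.1) = true := by simp [hq]
        rw [this]
        constructor
        · rintro (hE | ⟨hr, hns, _⟩)
          · exact Or.inl hE
          · exact absurd ⟨by rw [hq]; exact hr.1, by rw [hq]; exact hr.2, by rw [hq]; exact hns⟩ hc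
        · rintro (hE | ⟨hr, hns, hfind⟩)
          · exact Or.inl hE
          · exact absurd ⟨by rw [hq]; exact hr.1, by rw [hq]; exact hr.2, by rw [hq]; exact hns⟩ hc
      · have : (p.1 == q.1) = false := by simp [hq]
        rw [this]

-- ---------- splice loop: equals the pointwise overlay tail ----------

def pvTail (xs : List Char) (d : PySem.Dict Int Char) (c : Nat) : List Char :=
  (List.range (xs.length - c)).map (fun j : Nat => (d.get? (((c + j : Nat) : Int))).getD (xs.getD (c + j) ' '))

theorem take_drop_map (xs : List Char) (c t : Nat) (h : c + t ≤ xs.length) :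
    (xs.drop c).take t = (List.range t).map (fun j => xs.getD (c + j) ' ') := by
  apply List.ext_getElem
  · simp; omega
  · intro i h1 h2
    simp only [List.getElem_take, List.getElem_drop, List.getElem_map, List.getElem_range]
    rw [List.getD_eq_getElem xs ' ' (by simp at h1; omega)]

theorem map_range_split {α : Type} (f : Nat → α) (a b : Nat) :
    (List.range (a + (1 + b))).map f
      = (List.range a).map f ++ ([f a] ++ (List.range b).map (fun j => f (a + 1 + j))) := by
  rw [List.range_add, List.map_append, List.map_map]
  congr 1
  rw [List.range_add, List.map_append, List.map_map, List.range_one]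
  simp only [List.map_cons, List.map_nil, Function.comp_def]
  have hf : (fun x => f (a + (1 + x))) = (fun j => f (a + 1 + j)) := by
    funext j; congr 1; omega
  simp only [Nat.add_zero, hf]

theorem splice_spec (xs : List Char) (d : PySem.Dict Int Char) :
    ∀ (S : List (Int × Char)) (c : Nat) (parts : List Char), c ≤ xs.length →
      S.Pairwise (fun a b => a.1 < b.1) →
      (∀ q ∈ S, (c : Int) ≤ q.1 ∧ q.1 < (xs.length : Int) ∧ d.get? q.1 = some q.2) →
      (∀ k : Nat, c ≤ k → k < xs.length → ∀ v, d.get? (k : Int) = some v → ((k : Int), v) ∈ S) →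
      (S.foldl (pvSpliceStep xs) (parts, (c : Int))).1
          ++ PySem.List.slice xs (some (S.foldl (pvSpliceStep xs) (parts, (c : Int))).2) none
        = parts ++ pvTail xs d c := by
  intro S
  induction S with
  | nil =>
    intro c parts hc _ _ hcomp
    simp only [List.foldl_nil]
    rw [PySem.List.slice_from_natCast]
    have hnone : ∀ j : Nat, j < xs.length - c → d.get? ((c + j : Nat) : Int) = none := by
      intro j hj
      cases ho : d.get? ((c + j : Nat) : Int) with
      | none => rfl
      | some v =>
        exact absurd (hcomp (c + j) (by omega) (by omega) v ho) (List.not_mem_nil)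
    have heq : pvTail xs d c = (List.range (xs.length - c)).map (fun j => xs.getD (c + j) ' ') := by
      unfold pvTail
      apply List.map_congr_left
      intro j hj
      rw [hnone j (by simpa using hj)]
      rfl
    rw [heq, ← take_drop_map xs c (xs.length - c) (by omega)]
    have hlen : (xs.drop c).length = xs.length - c := by simp
    rw [← hlen, List.take_length]
  | cons p S ih =>
    intro c parts hc hpw hsound hcomp
    obtain ⟨hcp, hplen, hget⟩ := hsound p List.mem_cons_self
    set m := p.1.toNat with hm
    have hp1 : (m : Int) = p.1 := Int.toNat_of_nonneg (by omega)
    have hcm : c ≤ m := by omega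
    have hmlen : m < xs.length := by omega
    simp only [List.foldl_cons]
    have hstep : pvSpliceStep xs (parts, (c : Int)) p
        = (parts ++ PySem.List.slice xs (some (c : Int)) (some p.1) ++ [p.2],
           ((m + 1 : Nat) : Int)) := by
      unfold pvSpliceStep
      simp only [Prod.mk.injEq]
      exact ⟨by simp, by push_cast; omega⟩
    rw [hstep]
    have hpw' : S.Pairwise (fun a b => a.1 < b.1) := hpw.of_cons
    have hhead : ∀ q ∈ S, p.1 < q.1 := fun q hq => (List.pairwise_cons.mp hpw).1 q hq
    have hsound' : ∀ q ∈ S, ((m + 1 : Nat) : Int) ≤ q.1 ∧ q.1 < (xs.length : Int) ∧ d.get? q.1 = some q.2 := by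
      intro q hq
      obtain ⟨h1, h2, h3⟩ := hsound q (List.mem_cons_of_mem _ hq)
      have h4 := hhead q hq
      refine ⟨by push_cast; omega, h2, h3⟩
    have hcomp' : ∀ k : Nat, m + 1 ≤ k → k < xs.length → ∀ v, d.get? (k : Int) = some v → ((k : Int), v) ∈ S := by
      intro k hk1 hk2 v hv
      rcases List.mem_cons.mp (hcomp k (by omega) hk2 v hv) with h | h
      · exfalso
        have : (k : Int) = p.1 := congrArg Prod.fst h
        omega
      · exact h
    have hmid : xs.length - c = (m - c) + (1 + (xs.length - (m + 1))) := by omega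
    have hseg1 : ∀ j : Nat, j < m - c → d.get? ((c + j : Nat) : Int) = none := by
      intro j hj
      cases ho : d.get? ((c + j : Nat) : Int) with
      | none => rfl
      | some v =>
        have := hcomp (c + j) (by omega) (by omega) v ho
        rcases List.mem_cons.mp this with h | h
        · have : ((c + j : Nat) : Int) = p.1 := congrArg Prod.fst h
          omega
        · have := hhead _ h
          simp only at this
          omega
    have htail : pvTail xs d c
        = (List.range (m - c)).map (fun j => xs.getD (c + j) ' ')
          ++ ([p.2] ++ pvTail xs d (m + 1)) := by
      unfold pvTail
      rw [hmid, map_range_split]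
      congr 1
      · apply List.map_congr_left
        intro j hj
        simp only [List.mem_range] at hj
        rw [hseg1 j hj]
        rfl
      congr 1
      · have harg : ((c + (m - c) : Nat) : Int) = p.1 := by push_cast; omega
        rw [harg, hget]
        rfl
      · apply List.map_congr_left
        intro j hj
        rw [show c + (m - c + 1 + j) = (m + 1) + j by omega]
    rw [htail]
    have := ih (m + 1) (parts ++ PySem.List.slice xs (some (c : Int)) (some p.1) ++ [p.2])
      (by omega) hpw' hsound' hcomp'
    rw [this]
    have hslice : PySem.List.slice xs (some (c : Int)) (some p.1)
        = (List.range (m - c)).map (fun j => xs.getD (c + j) ' ') := by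
      rw [← hp1, PySem.List.slice_natCast, take_drop_map xs c (m - c) (by omega)]
    rw [hslice]
    simp [List.append_assoc]

theorem pvTail_zero (xs : List Char) (d : PySem.Dict Int Char) :
    pvTail xs d 0 = pvApply d xs := by
  apply List.ext_getElem?
  intro k
  rw [getElem?_pvApply]
  by_cases hk : k < xs.length
  · unfold pvTail
    rw [List.getElem?_map, List.getElem?_range (by omega), List.getElem?_eq_getElem hk]
    simp only [Option.map_some, Nat.zero_add]
    rw [List.getD_eq_getElem xs ' ' hk]
  · unfold pvTail
    rw [List.getElem?_map, List.getElem?_eq_none (by simp; omega), List.getElem?_eq_none (by omega)]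
    rfl

-- ===== VERDICT (by name: the statement is the Claim_ definition above) =====
theorem signature_to_sequence_spec : Claim_equal_signature_to_sequence := by
  intro sig wt _ _
  unfold Spec_signature_to_sequence signature_to_sequence signature_to_sequence_alt
  by_cases h : sig.toList = []
  · simp [h]
  · simp only [h, ite_false]
    set xs := wt.toList with hxs
    set toks := PySem.Chars.splitOn sig.toList [';'] with htoks
    set pairs := toks.foldl pvParseTok [] with hpairs
    set d := pairs.foldl (fun d p => d.insert p.1 p.2) PySem.Dict.empty with hd
    have hA : toks.foldl pvStepA xs = pvApply d xs := by
      calc toks.foldl pvStepA xs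
          = toks.foldl pvStepA (pvApply PySem.Dict.empty xs) := by rw [pvApply_empty]
        _ = pvApply (toks.foldl pvRecord PySem.Dict.empty) xs := pvFold_comm toks xs _
        _ = pvApply d xs := by rw [record_eq_dict_fold, hd]
    have hget : ∀ k : Int, d.get? k
        = match pairs.reverse.find? (fun q => q.1 == k) with
          | some q => some q.2
          | none => none := by
      intro k
      rw [hd, get?_dict_fold]
      cases pairs.reverse.find? (fun q => q.1 == k) with
      | none => simp [PySem.Dict.get?_empty]
      | some q => rfl
    have hdedup := dedup_spec ((xs.length : Int)) pairs.reverse PySem.Set.empty []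
      (by intro k; simp [PySem.Set.empty]) (by simp)
    set edits := (pairs.reverse.foldl (pvDedupStep ((xs.length : Int))) (PySem.Set.empty, [])).2 with hedits
    have hmemE : ∀ q : Int × Char,
        q ∈ edits ↔ (0 ≤ q.1 ∧ q.1 < (xs.length : Int)) ∧ d.get? q.1 = some q.2 := by
      intro q
      rw [hedits, hdedup.1 q]
      simp only [List.not_mem_nil, false_or]
      constructor
      · rintro ⟨hr, _, hf⟩
        refine ⟨hr, ?_⟩
        rw [hget q.1, hf]
      · rintro ⟨hr, hgq⟩
        refine ⟨hr, by simp [PySem.Set.empty], ?_⟩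
        rw [hget q.1] at hgq
        cases hf : pairs.reverse.find? (fun r => r.1 == q.1) with
        | none => rw [hf] at hgq; exact absurd hgq (by simp)
        | some r =>
          rw [hf] at hgq
          simp only [Option.some.injEq] at hgq
          have h1 : r.1 = q.1 := by simpa using List.find?_some hf
          exact congrArg some (Prod.ext_iff.mpr ⟨h1, hgq⟩)
    have hnodup : (edits.map Prod.fst).Nodup := hdedup.2
    set S := PySem.List.sorted edits (fun e => e.1) false with hS
    have hperm : S.Perm edits := PySem.List.sorted_perm edits (fun e => e.1) false
    have hmemS : ∀ q : Int × Char, q ∈ S ↔ q ∈ edits := fun q =>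
      PySem.List.mem_sorted edits (fun e => e.1) false q
    have hndS : (S.map Prod.fst).Nodup := ((hperm.map Prod.fst).nodup_iff).mpr hnodup
    have hle : S.Pairwise (fun a b => a.1 ≤ b.1) :=
      PySem.List.sorted_pairwise edits (fun e => e.1)
    have hlt : S.Pairwise (fun a b => a.1 < b.1) := by
      have hne : S.Pairwise (fun a b => a.1 ≠ b.1) := List.pairwise_map.mp hndS
      exact (hle.and hne).imp (fun h => lt_of_le_of_ne h.1 h.2)
    have hsound : ∀ q ∈ S, ((0 : Nat) : Int) ≤ q.1 ∧ q.1 < (xs.length : Int) ∧ d.get? q.1 = some q.2 := by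
      intro q hq
      obtain ⟨⟨h1, h2⟩, h3⟩ := (hmemE q).mp ((hmemS q).mp hq)
      exact ⟨by exact_mod_cast h1, h2, h3⟩
    have hcomp : ∀ k : Nat, 0 ≤ k → k < xs.length → ∀ v, d.get? (k : Int) = some v → ((k : Int), v) ∈ S := by
      intro k _ hk v hv
      refine (hmemS _).mpr ((hmemE _).mpr ⟨⟨?_, ?_⟩, hv⟩)
      · show (0 : Int) ≤ (k : Int); omega
      · show (k : Int) < (xs.length : Int); exact_mod_cast hk
    have hsp := splice_spec xs d S 0 [] (by omega) hlt hsound hcomp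
    simp only [Nat.cast_zero] at hsp
    apply congrArg String.ofList
    rw [hA, hsp, List.nil_append, pvTail_zero]
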